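-- pv_equiv track=rewrite | github.com/ZckFreedom/Mathworks | db_sqence/k_ary_dB.py | find_first_max
-- ===== SOURCE A (Python) =====
-- def if_nk(sequence_list, ary):
-- 	if len(sequence_list) == 0:
-- 		return False
-- 	n = len(sequence_list)
-- 	degree = ary ** (n-1)
-- 	value1 = 0
-- 	for i in range(n):
-- 		value1 += sequence_list[i] * (ary ** (n-i-1))
-- 	a1 = value1//degree
-- 	value2 = (ary * value1 + a1) % (ary ** n)
-- 	while value2 != value1:
-- 		if value2 < value1:
-- 			return False
-- 		a1 = value2 // degree
-- 		value2 = (ary * value2 + a1) % (ary ** n)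
-- 	return True
--
-- def find_first_max(s_sequence, ary):
-- 	x_max = ary - 2
-- 	middle_sequence = [x_max] + s_sequence[1:]
-- 	while x_max > -1:
-- 		if if_nk(middle_sequence, ary):
-- 			return x_max
-- 		else:
-- 			x_max -= 1
-- 			middle_sequence = [x_max] + s_sequence[1:]
--
-- 	return -1
-- ===== SOURCE B (Python) =====
-- def find_first_max(s_sequence, ary):
--     tail = s_sequence[1:]
--     for x in range(ary - 2, -1, -1):
--         seq = [x] + tail
--         rots = [seq[i:] + seq[:i] for i in range(len(seq))]
--         if seq == min(rots):
--             return x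
--     return -1
-- ===== Notes on version B (the rewrite author's own statement) =====
-- stated objective: simpler
-- what changed: A tests each candidate head digit by encoding the sequence as a base-ary bignum and repeatedly rotating it arithmetically (floordiv/mod by ary^n) until it either dips below or returns to the start; B simply builds the list of all left-rotations of the digit list and checks whether the sequence equals min(rotations), i.e. is the lexicographically least rotation.
-- outside the precondition, e.g. on find_first_max([0, 5], 2): A returns -1, B returns 0; on find_first_max([0, -5], 2): A does not finish within the time limit, B returns -1
import Mathlib
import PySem

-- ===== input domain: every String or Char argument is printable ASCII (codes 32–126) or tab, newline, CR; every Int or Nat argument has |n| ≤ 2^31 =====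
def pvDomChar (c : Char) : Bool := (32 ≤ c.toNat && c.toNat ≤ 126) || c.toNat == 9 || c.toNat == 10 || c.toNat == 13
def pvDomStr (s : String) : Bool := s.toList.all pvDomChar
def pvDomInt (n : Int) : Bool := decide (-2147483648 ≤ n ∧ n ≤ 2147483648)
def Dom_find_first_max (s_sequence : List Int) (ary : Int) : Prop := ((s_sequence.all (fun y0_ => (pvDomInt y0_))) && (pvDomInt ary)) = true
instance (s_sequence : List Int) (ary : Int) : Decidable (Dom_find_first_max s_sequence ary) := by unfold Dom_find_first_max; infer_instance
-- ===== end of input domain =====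

-- B replaces A's bignum encode-and-rotate test by directly checking that the digit list
-- equals the lexicographic minimum of all its left-rotations (simpler, same cost).

-- ===== PORT A =====
-- the while-loop of if_nk, as fuel recursion; on Pre_ the running value cycles through the
-- n left-rotations of value1's digit string, so fuel = n always suffices (proved below)
def ifNkLoop (ary degree modn value1 : Int) : Nat → Int → Bool
  | 0, _ => true
  | fuel + 1, value2 =>
    if value2 = value1 then true
    else if value2 < value1 then false
    else ifNkLoop ary degree modn value1 fuel
          (PySem.Int.mod (ary * value2 + PySem.Int.floordiv value2 degree) modn)

def if_nk (sequence_list : List Int) (ary : Int) : Bool :=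
  if sequence_list.length = 0 then false
  else
    let n := sequence_list.length
    let degree := ary ^ (n - 1)
    -- for i in range(n): value1 += sequence_list[i] * ary ** (n-i-1)  (index i is in range)
    let value1 := (List.range n).foldl
      (fun v i => v + sequence_list.getD i 0 * ary ^ (n - i - 1)) 0
    let a1 := PySem.Int.floordiv value1 degree
    let value2 := PySem.Int.mod (ary * value1 + a1) (ary ^ n)
    ifNkLoop ary degree (ary ^ n) value1 n value2

-- 'while x_max > -1: … x_max -= 1'; fuel (ary-1).toNat reaches 0 exactly when x_max = -1
def ffmLoop (tail : List Int) (ary : Int) : Nat → Int → Int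
  | 0, _ => -1
  | fuel + 1, x_max =>
    if x_max > -1 then
      if if_nk (x_max :: tail) ary then x_max
      else ffmLoop tail ary fuel (x_max - 1)
    else -1

def find_first_max (s_sequence : List Int) (ary : Int) : Int :=
  ffmLoop (s_sequence.drop 1) ary (ary - 1).toNat (ary - 2)

-- ===== PORT B =====
-- Python's '<' on two int lists (lexicographic)
def lexLtB : List Int → List Int → Bool
  | _, [] => false
  | [], _ :: _ => true
  | a :: u, c :: v => if a < c then true else if c < a then false else lexLtB u v

-- Python's min() on a list of int lists (first minimum); only applied to nonempty lists
def pyMinL : List (List Int) → List Int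
  | [] => []
  | m :: t => t.foldl (fun m r => if lexLtB r m then r else m) m

def altGo (tail : List Int) : List Int → Int
  | [] => -1
  | x :: xs =>
    let seq := x :: tail
    let rots := (List.range seq.length).map (fun i => seq.drop i ++ seq.take i)
    if seq = pyMinL rots then x else altGo tail xs

def find_first_max_alt (s_sequence : List Int) (ary : Int) : Int :=
  altGo (s_sequence.drop 1) (PySem.List.pyRange (ary - 2) (-1) (-1))

-- ===== PRECONDITION & SPEC =====
-- Pre_ excludes inputs with ary ≥ 2 whose tail is not a list of base-ary digits: there A's
-- numeric rotation encoding is meaningless (A can diverge, or return an accidental value).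
def Pre_find_first_max (s_sequence : List Int) (ary : Int) : Prop :=
  ary ≤ 1 ∨ ∀ d ∈ s_sequence.drop 1, 0 ≤ d ∧ d < ary
instance (s_sequence : List Int) (ary : Int) : Decidable (Pre_find_first_max s_sequence ary) := by
  unfold Pre_find_first_max; infer_instance

def pvWitness_find_first_max : List Int × Int := ([1, 0, 1], 2)

def Spec_find_first_max (s_sequence : List Int) (ary : Int) (out : Int) : Prop := out = find_first_max_alt s_sequence ary
instance (s_sequence : List Int) (ary : Int) (out : Int) : Decidable (Spec_find_first_max s_sequence ary out) := by unfold Spec_find_first_max; infer_instance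

-- ===== CLAIM (what is proved, stated in full; the proofs are below) =====
def Claim_equal_find_first_max : Prop := ∀ (s_sequence : List Int) (ary : Int), Dom_find_first_max s_sequence ary → Pre_find_first_max s_sequence ary → Spec_find_first_max s_sequence ary (find_first_max s_sequence ary)

-- ===== LEMMAS AND PROOFS =====

-- the base-b value of a digit list (Horner form)
def pvVal (b : Int) (l : List Int) : Int := l.foldl (fun a d => a * b + d) 0

def pvValid (b : Int) (l : List Int) : Prop := ∀ d ∈ l, 0 ≤ d ∧ d < b

-- "the sequence is minimal among all its left-rotations, numerically"
def pvMinimal (b : Int) (seq : List Int) : Prop :=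
  ∀ k : Nat, pvVal b seq ≤ pvVal b (seq.rotate k)

theorem pvVal_shift (b : Int) (u : List Int) : ∀ c : Int,
    u.foldl (fun a d => a * b + d) c = c * b ^ u.length + pvVal b u := by
  induction u with
  | nil => intro c; simp [pvVal]
  | cons d u ih =>
    intro c
    show u.foldl (fun a d => a * b + d) (c * b + d) = c * b ^ (d :: u).length + pvVal b (d :: u)
    rw [ih (c * b + d)]
    have h2 : pvVal b (d :: u) = u.foldl (fun a d => a * b + d) (0 * b + d) := rfl
    rw [h2, ih (0 * b + d), List.length_cons]
    ring

theorem pvVal_cons (b d : Int) (u : List Int) :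
    pvVal b (d :: u) = d * b ^ u.length + pvVal b u := by
  have h1 : pvVal b (d :: u) = u.foldl (fun a d => a * b + d) (0 * b + d) := rfl
  rw [h1, pvVal_shift]
  ring

theorem pvVal_append (b : Int) (u v : List Int) :
    pvVal b (u ++ v) = pvVal b u * b ^ v.length + pvVal b v := by
  have h1 : pvVal b (u ++ v) = v.foldl (fun a d => a * b + d) (pvVal b u) := by
    simp only [pvVal, List.foldl_append]
  rw [h1, pvVal_shift]

theorem pvVal_nonneg (b : Int) (hb : 0 < b) (l : List Int) (hv : pvValid b l) :
    0 ≤ pvVal b l := by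
  induction l with
  | nil => simp [pvVal]
  | cons d u ih =>
    rw [pvVal_cons]
    have hd := hv d (by simp)
    have hu : 0 ≤ pvVal b u := ih (fun x hx => hv x (by simp [hx]))
    have : (0:Int) ≤ b ^ u.length := pow_nonneg hb.le _
    nlinarith

theorem pvVal_lt_pow (b : Int) (hb : 0 < b) (l : List Int) (hv : pvValid b l) :
    pvVal b l < b ^ l.length := by
  induction l with
  | nil => simp [pvVal]
  | cons d u ih =>
    rw [pvVal_cons, List.length_cons]
    have hd := hv d (by simp)
    have hu : pvVal b u < b ^ u.length := ih (fun x hx => hv x (by simp [hx]))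
    have hp : (0:Int) < b ^ u.length := pow_pos hb _
    have : d * b ^ u.length ≤ (b - 1) * b ^ u.length := by nlinarith
    rw [pow_succ]
    nlinarith

theorem pvVal_lt_of_head_lt (b a c : Int) (u v : List Int) (hb : 0 < b)
    (hu : pvValid b u) (hv : pvValid b v) (hl : u.length = v.length) (hac : a < c) :
    pvVal b (a :: u) < pvVal b (c :: v) := by
  rw [pvVal_cons, pvVal_cons, hl]
  have h1 : pvVal b u < b ^ v.length := hl ▸ pvVal_lt_pow b hb u hu
  have h2 : 0 ≤ pvVal b v := pvVal_nonneg b hb v hv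
  have hp : (0:Int) < b ^ v.length := pow_pos hb _
  nlinarith

theorem lexLtB_eq_val (b : Int) (hb : 0 < b) : ∀ (u v : List Int),
    pvValid b u → pvValid b v → u.length = v.length →
    lexLtB u v = decide (pvVal b u < pvVal b v) := by
  intro u
  induction u with
  | nil => intro v _ _ hl; cases v <;> simp_all [lexLtB]
  | cons a u ih =>
    intro v hu hv hl
    cases v with
    | nil => simp at hl
    | cons c v =>
      have hu' : pvValid b u := fun x hx => hu x (by simp [hx])
      have hv' : pvValid b v := fun x hx => hv x (by simp [hx])
      have hl' : u.length = v.length := by simpa using hl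
      rcases lt_trichotomy a c with h | h | h
      · have := pvVal_lt_of_head_lt b a c u v hb hu' hv' hl' h
        simp [lexLtB, h, this]
      · subst h
        have : lexLtB (a :: u) (a :: v) = lexLtB u v := by
          simp [lexLtB]
        rw [this, ih v hu' hv' hl']
        rw [pvVal_cons, pvVal_cons, hl']
        simp
      · have := pvVal_lt_of_head_lt b c a v u hb hv' hu' hl'.symm h
        simp [lexLtB, h.not_gt, h]
        omega

theorem pvVal_inj (b : Int) (hb : 0 < b) : ∀ (u v : List Int),
    pvValid b u → pvValid b v → u.length = v.length →
    pvVal b u = pvVal b v → u = v := by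
  intro u
  induction u with
  | nil => intro v _ _ hl _; cases v <;> simp_all
  | cons a u ih =>
    intro v hu hv hl he
    cases v with
    | nil => simp at hl
    | cons c v =>
      have hu' : pvValid b u := fun x hx => hu x (by simp [hx])
      have hv' : pvValid b v := fun x hx => hv x (by simp [hx])
      have hl' : u.length = v.length := by simpa using hl
      rcases lt_trichotomy a c with h | h | h
      · exact absurd he (pvVal_lt_of_head_lt b a c u v hb hu' hv' hl' h).ne
      · subst h
        rw [pvVal_cons, pvVal_cons, hl'] at he
        have : pvVal b u = pvVal b v := by omega
        rw [ih v hu' hv' hl' this]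
      · exact absurd he.symm (pvVal_lt_of_head_lt b c a v u hb hv' hu' hl'.symm h).ne

-- the arithmetic step of if_nk's while-loop is left rotation of the digit string
theorem pvRotStep (b h : Int) (t : List Int) (hb : 2 ≤ b)
    (hh : 0 ≤ h ∧ h < b) (ht : pvValid b t) :
    PySem.Int.mod (b * pvVal b (h :: t) + PySem.Int.floordiv (pvVal b (h :: t)) (b ^ t.length))
        (b ^ (t.length + 1)) = pvVal b (t ++ [h]) := by
  have hb0 : (0:Int) < b := by omega
  have hB : (0:Int) < b ^ t.length := pow_pos hb0 _
  have hr0 : 0 ≤ pvVal b t := pvVal_nonneg b hb0 t ht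
  have hrB : pvVal b t < b ^ t.length := pvVal_lt_pow b hb0 t ht
  have hval : pvVal b (h :: t) = pvVal b t + h * b ^ t.length := by
    rw [pvVal_cons]; ring
  have hdiv : PySem.Int.floordiv (pvVal b (h :: t)) (b ^ t.length) = h := by
    rw [PySem.Int.floordiv_eq_ediv_of_pos hB, hval, Int.add_mul_ediv_right _ _ hB.ne',
      Int.ediv_eq_zero_of_lt hr0 hrB, zero_add]
  rw [hdiv, PySem.Int.mod_eq_emod_of_pos (pow_pos hb0 (t.length + 1))]
  have hsplit : b * pvVal b (h :: t) + h = (b * pvVal b t + h) + b ^ (t.length + 1) * h := by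
    rw [hval, pow_succ]; ring
  rw [hsplit, Int.add_mul_emod_self_left]
  have hlt : b * pvVal b t + h < b ^ (t.length + 1) := by
    rw [pow_succ]; nlinarith
  rw [Int.emod_eq_of_lt (by nlinarith) hlt]
  rw [pvVal_append, pvVal_cons]
  simp [pvVal]
  ring

theorem pvValid_rotate (b : Int) (seq : List Int) (hv : pvValid b seq) (k : Nat) :
    pvValid b (seq.rotate k) := fun d hd => hv d ((List.mem_rotate).1 hd)

-- the while-loop of if_nk accepts exactly the rotation-minimal sequences
theorem ifNkLoop_iff (b : Int) (hb : 2 ≤ b) (seq : List Int) (hne : seq ≠ [])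
    (hv : pvValid b seq) : ∀ (fuel j : Nat), 1 ≤ j → j + fuel = seq.length + 1 →
    (∀ k, 1 ≤ k → k < j → pvVal b seq ≤ pvVal b (seq.rotate k)) →
    ((ifNkLoop b (b ^ (seq.length - 1)) (b ^ seq.length) (pvVal b seq) fuel
        (pvVal b (seq.rotate j)) = true) ↔ pvMinimal b seq) := by
  have hb0 : (0:Int) < b := by omega
  have hn : 0 < seq.length := List.length_pos_iff.2 hne
  intro fuel
  induction fuel with
  | zero =>
    intro j hj1 hjf hmin
    simp only [ifNkLoop, true_iff]
    unfold pvMinimal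
    intro k
    rw [← List.rotate_mod]
    rcases Nat.eq_zero_or_pos (k % seq.length) with h | h
    · rw [h, List.rotate_zero]
    · exact hmin _ h (by have := Nat.mod_lt k hn; omega)
  | succ fuel ih =>
    intro j hj1 hjf hmin
    have hjn : j ≤ seq.length := by omega
    simp only [ifNkLoop]
    by_cases he : pvVal b (seq.rotate j) = pvVal b seq
    · rw [if_pos he]
      refine iff_of_true rfl ?_
      have hrot : seq.rotate j = seq :=
        pvVal_inj b hb0 _ _ (pvValid_rotate b seq hv j) hv (List.length_rotate _ _) he
      unfold pvMinimal
      intro k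
      induction k using Nat.strong_induction_on with
      | _ k ihk =>
        by_cases hk : k < j
        · rcases Nat.eq_zero_or_pos k with h | h
          · rw [h, List.rotate_zero]
          · exact hmin k h hk
        · rw [not_lt] at hk
          have : seq.rotate k = seq.rotate (k - j) := by
            conv_lhs => rw [show k = j + (k - j) by omega, ← List.rotate_rotate, hrot]
          rw [this]
          exact ihk (k - j) (by omega)
    · rw [if_neg he]
      by_cases hlt : pvVal b (seq.rotate j) < pvVal b seq
      · rw [if_pos hlt]
        refine iff_of_false (by simp) ?_
        intro hminall
        exact absurd (hminall j) (by omega)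
      · rw [if_neg hlt]
        have hjlt : j < seq.length := by
          rcases Nat.lt_or_ge j seq.length with h | h
          · exact h
          · exfalso; apply he
            have : j = seq.length := by omega
            rw [this, List.rotate_length]
        -- decompose the current rotation as a cons and apply the step lemma
        obtain ⟨h, t, hht⟩ : ∃ h t, seq.rotate j = h :: t := by
          cases hrot : seq.rotate j with
          | nil => exfalso; have := List.length_rotate seq j; rw [hrot] at this; simp at this; omega
          | cons h t => exact ⟨h, t, rfl⟩
        have hvr : pvValid b (h :: t) := hht ▸ pvValid_rotate b seq hv j
        have hlen : t.length + 1 = seq.length := by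
          have := List.length_rotate seq j; rw [hht] at this; simpa using this
        have hstep : PySem.Int.mod (b * pvVal b (seq.rotate j) +
            PySem.Int.floordiv (pvVal b (seq.rotate j)) (b ^ (seq.length - 1)))
            (b ^ seq.length) = pvVal b (seq.rotate (j + 1)) := by
          rw [hht, show seq.length - 1 = t.length by omega, ← hlen]
          rw [pvRotStep b h t hb ⟨(hvr h (by simp)).1, (hvr h (by simp)).2⟩
            (fun x hx => hvr x (by simp [hx]))]
          have : seq.rotate (j + 1) = (seq.rotate j).rotate 1 := by
            rw [List.rotate_rotate]
          rw [this, hht, List.rotate_cons_succ, List.rotate_zero]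
        rw [hstep]
        apply ih (j + 1) (by omega) (by omega)
        intro k hk1 hkj
        by_cases hkj' : k < j
        · exact hmin k hk1 hkj'
        · have : k = j := by omega
          subst this; omega

-- A's indexed power sum computes the Horner value
theorem pvSumVal (b : Int) : ∀ (seq : List Int),
    (List.range seq.length).foldl
      (fun v i => v + seq.getD i 0 * b ^ (seq.length - i - 1)) 0 = pvVal b seq := by
  have hfold : ∀ (l : List Nat) (f : Nat → Int),
      l.foldl (fun v i => v + f i) 0 = (l.map f).sum := by
    intro l f
    rw [List.sum_eq_foldl, List.foldl_map]
  intro seq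
  induction seq using List.reverseRecOn with
  | nil => simp [pvVal]
  | append_singleton u a ih =>
    rw [hfold] at ih ⊢
    have hlen : (u ++ [a]).length = u.length + 1 := by simp
    rw [hlen, List.range_succ, List.map_append, List.sum_append]
    have hmap : (List.range u.length).map
        (fun i => (u ++ [a]).getD i 0 * b ^ (u.length + 1 - i - 1)) =
        (List.range u.length).map
        (fun i => (u.getD i 0 * b ^ (u.length - i - 1)) * b) := by
      apply List.map_congr_left
      intro i hi
      have hi' : i < u.length := List.mem_range.1 hi
      rw [List.getD_append _ _ _ _ hi']
      have : u.length + 1 - i - 1 = (u.length - i - 1) + 1 := by omega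
      rw [this, pow_succ]; ring
    rw [hmap, List.sum_map_mul_right, ih]
    have hlast : (u ++ [a]).getD u.length 0 = a := by
      rw [List.getD_append_right _ _ _ _ (le_refl _)]
      simp
    simp only [List.map_cons, List.map_nil, List.sum_cons, List.sum_nil, hlast]
    rw [pvVal_append, pvVal_cons]
    simp [pvVal]

-- if_nk decides rotation-minimality
theorem if_nk_iff (b : Int) (hb : 2 ≤ b) (seq : List Int) (hne : seq ≠ [])
    (hv : pvValid b seq) : (if_nk seq b = true ↔ pvMinimal b seq) := by
  have hb0 : (0:Int) < b := by omega
  have hn : 0 < seq.length := List.length_pos_iff.2 hne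
  unfold if_nk
  rw [if_neg (by omega)]
  simp only [pvSumVal b seq]
  obtain ⟨h, t, hht⟩ : ∃ h t, seq = h :: t := by
    cases seq with
    | nil => exact absurd rfl hne
    | cons h t => exact ⟨h, t, rfl⟩
  have hstep : PySem.Int.mod (b * pvVal b seq +
      PySem.Int.floordiv (pvVal b seq) (b ^ (seq.length - 1)))
      (b ^ seq.length) = pvVal b (seq.rotate 1) := by
    rw [hht, show (h :: t).length - 1 = t.length by simp, show (h :: t).length = t.length + 1 by simp]
    rw [pvRotStep b h t hb ⟨(hv h (by rw [hht]; simp)).1, (hv h (by rw [hht]; simp)).2⟩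
      (fun x hx => hv x (by rw [hht]; simp [hx]))]
    rw [List.rotate_cons_succ, List.rotate_zero]
  rw [hstep]
  exact ifNkLoop_iff b hb seq hne hv seq.length 1 (le_refl 1) (by omega)
    (by intro k h1 h2; omega)

-- Python min over a nonempty list of equal-length digit lists: a member of least value
theorem pyMinL_char (b : Int) (hb : 0 < b) (n : Nat) : ∀ (t : List (List Int)) (m : List Int),
    (pvValid b m ∧ m.length = n) → (∀ y ∈ t, pvValid b y ∧ y.length = n) →
    (pyMinL (m :: t) ∈ m :: t ∧ ∀ y ∈ m :: t, pvVal b (pyMinL (m :: t)) ≤ pvVal b y) := by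
  intro t
  induction t with
  | nil => intro m _ _; simp [pyMinL]
  | cons x t ih =>
    intro m hm hall
    have hx := hall x (by simp)
    have hstep : pyMinL (m :: x :: t) = pyMinL ((if lexLtB x m then x else m) :: t) := by
      simp [pyMinL]
    have hgood : pvValid b (if lexLtB x m then x else m) ∧
        (if lexLtB x m then x else m).length = n := by
      split <;> [exact hx; exact hm]
    obtain ⟨hmem, hle⟩ := ih _ hgood (fun y hy => hall y (by simp [hy]))
    have hlex : lexLtB x m = decide (pvVal b x < pvVal b m) :=
      lexLtB_eq_val b hb x m hx.1 hm.1 (by rw [hx.2, hm.2])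
    have hheadle : pvVal b (pyMinL ((if lexLtB x m then x else m) :: t)) ≤
        pvVal b (if lexLtB x m then x else m) := hle _ (by simp)
    constructor
    · rw [hstep]
      rcases List.mem_cons.1 hmem with h | h
      · rw [h]; split <;> simp
      · simp [h]
    · intro y hy
      rw [hstep]
      rcases List.mem_cons.1 hy with h | h
      · -- y = m
        subst h
        refine le_trans hheadle ?_
        split_ifs with hc
        · rw [hlex] at hc
          have : pvVal b x < pvVal b y := of_decide_eq_true hc
          linarith
        · exact le_refl _
      · rcases List.mem_cons.1 h with h' | h'
        · -- y = x
          subst h'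
          refine le_trans hheadle ?_
          split_ifs with hc
          · exact le_refl _
          · rw [hlex] at hc
            simp only [decide_eq_true_eq] at hc
            linarith [not_lt.1 hc]
        · exact hle y (by simp [h'])

-- B's test decides rotation-minimality too
theorem altTest_iff (b : Int) (hb : 2 ≤ b) (seq : List Int) (hne : seq ≠ [])
    (hv : pvValid b seq) :
    ((seq = pyMinL ((List.range seq.length).map (fun i => seq.drop i ++ seq.take i)))
      ↔ pvMinimal b seq) := by
  have hb0 : (0:Int) < b := by omega
  have hn : 0 < seq.length := List.length_pos_iff.2 hne
  have hrw : (List.range seq.length).map (fun i => seq.drop i ++ seq.take i) =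
      (List.range seq.length).map (fun i => seq.rotate i) := by
    apply List.map_congr_left
    intro i hi
    exact (List.rotate_eq_drop_append_take (le_of_lt (List.mem_range.1 hi))).symm
  rw [hrw]
  obtain ⟨m, rest, hcons⟩ : ∃ m rest,
      (List.range seq.length).map (fun i => seq.rotate i) = m :: rest := by
    cases hc : (List.range seq.length).map (fun i => seq.rotate i) with
    | nil =>
      exfalso
      have h0 : ((List.range seq.length).map (fun i => seq.rotate i)).length = 0 := by
        rw [hc]; rfl
      rw [List.length_map, List.length_range] at h0
      omega
    | cons m rest => exact ⟨m, rest, rfl⟩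
  have hallmem : ∀ y ∈ m :: rest, pvValid b y ∧ y.length = seq.length := by
    intro y hy
    rw [← hcons] at hy
    obtain ⟨i, _, hi⟩ := List.mem_map.1 hy
    exact ⟨hi ▸ pvValid_rotate b seq hv i, hi ▸ List.length_rotate _ _⟩
  obtain ⟨hmem, hle⟩ := pyMinL_char b hb0 seq.length rest m
    (hallmem m (by simp)) (fun y hy => hallmem y (by simp [hy]))
  have hseqmem : seq ∈ m :: rest := by
    rw [← hcons]
    exact List.mem_map.2 ⟨0, List.mem_range.2 hn, List.rotate_zero seq⟩
  rw [hcons]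
  constructor
  · intro heq
    unfold pvMinimal
    intro k
    have hmemrot : seq.rotate (k % seq.length) ∈ m :: rest := by
      rw [← hcons]
      exact List.mem_map.2 ⟨k % seq.length, List.mem_range.2 (Nat.mod_lt k hn), rfl⟩
    have h := hle _ hmemrot
    rw [← heq] at h
    rw [← List.rotate_mod]
    exact h
  · intro hmin
    have h1 : pvVal b (pyMinL (m :: rest)) ≤ pvVal b seq := hle seq hseqmem
    have h2 : pvVal b seq ≤ pvVal b (pyMinL (m :: rest)) := by
      have hmem' : pyMinL (m :: rest) ∈ (List.range seq.length).map (fun i => seq.rotate i) := by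
        rw [hcons]; exact hmem
      obtain ⟨i, _, hi⟩ := List.mem_map.1 hmem'
      calc pvVal b seq ≤ pvVal b (seq.rotate i) := hmin i
        _ = pvVal b (pyMinL (m :: rest)) := by rw [hi]
    obtain ⟨hvm, hlm⟩ := hallmem _ hmem
    exact pvVal_inj b hb0 seq _ hv hvm hlm.symm (le_antisymm h2 h1)

-- descending range(x, -1, -1) unrolls by one
theorem pyRangeDown_cons (x : Int) (hx : 0 ≤ x) :
    PySem.List.pyRange x (-1) (-1) = x :: PySem.List.pyRange (x - 1) (-1) (-1) := by
  simp only [PySem.List.pyRange]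
  norm_num
  rw [if_pos (show (-1:Int) < x by omega),
    show (if 0 < x then x.toNat else 0) = x.toNat by split_ifs <;> omega,
    show (x + 1).toNat = x.toNat + 1 by omega,
    List.range_succ_eq_map, List.map_cons, List.map_map]
  refine List.cons_eq_cons.mpr ⟨by simp, ?_⟩
  apply List.map_congr_left
  intro i _
  simp only [Function.comp_apply]
  push_cast
  ring

theorem pyRangeDown_nil (x : Int) (hx : x ≤ -1) :
    PySem.List.pyRange x (-1) (-1) = [] := by
  simp only [PySem.List.pyRange]
  norm_num
  intro h
  omega

-- the two candidate loops agree step by step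
theorem loops_eq (b : Int) (hb : 2 ≤ b) (tail : List Int) (hv : pvValid b tail) :
    ∀ (fuel : Nat) (x : Int), x < b - 1 → x + 1 ≤ (fuel : Int) →
    ffmLoop tail b fuel x = altGo tail (PySem.List.pyRange x (-1) (-1)) := by
  intro fuel
  induction fuel with
  | zero =>
    intro x _ hxf
    rw [pyRangeDown_nil x (by exact_mod_cast (by omega : x ≤ -1))]
    simp [ffmLoop, altGo]
  | succ fuel ih =>
    intro x hxb hxf
    by_cases hx : x > -1
    · rw [pyRangeDown_cons x (by omega)]
      simp only [ffmLoop, altGo, if_pos hx]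
      have hvseq : pvValid b (x :: tail) := by
        intro d hd
        rcases List.mem_cons.1 hd with h | h
        · subst h; constructor <;> omega
        · exact hv d h
      have htest : if_nk (x :: tail) b = true ↔
          (x :: tail = pyMinL ((List.range (x :: tail).length).map
            (fun i => (x :: tail).drop i ++ (x :: tail).take i))) := by
        rw [if_nk_iff b hb _ (by simp) hvseq, altTest_iff b hb _ (by simp) hvseq]
      by_cases hc : if_nk (x :: tail) b = true
      · rw [if_pos hc, if_pos (htest.1 hc)]
      · rw [if_neg (by simpa using hc), if_neg (fun h => hc (htest.2 h))]
        have : (fuel : Int) + 1 = ((fuel + 1 : Nat) : Int) := by push_cast; ring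
        exact ih (x - 1) (by omega) (by push_cast at hxf ⊢; omega)
    · rw [pyRangeDown_nil x (by omega)]
      simp [ffmLoop, altGo, hx]

-- ===== VERDICT (by name: the statement is the Claim_ definition above) =====
theorem find_first_max_spec : Claim_equal_find_first_max := by
  intro s ary _ hpre
  unfold Spec_find_first_max find_first_max find_first_max_alt
  by_cases hary : ary ≤ 1
  · have h0 : (ary - 1).toNat = 0 := by omega
    rw [h0, pyRangeDown_nil (ary - 2) (by omega)]
    simp [ffmLoop, altGo]
  · have hb : 2 ≤ ary := by omega
    have hv : pvValid ary (s.drop 1) := by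
      rcases hpre with h | h
      · omega
      · exact h
    have hfu : (ary - 2) + 1 ≤ (((ary - 1).toNat : Nat) : Int) := by
      rw [Int.toNat_of_nonneg (by omega)]; omega
    exact loops_eq ary hb (s.drop 1) hv (ary - 1).toNat (ary - 2) (by omega) hfu
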